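-- pv_equiv track=rewrite | github.com/ebete/MC_HiC | normalise_aln_score.py | unclipped_length
-- ===== SOURCE A (Python) =====
-- def unclipped_length(cigar_tuple):
--     unclipped = 0
--     total = 0
--     for k, v in cigar_tuple:
--         total += v
--         if k in (4, 5):  # skip clipped
--             continue
--         unclipped += v
--     return total, unclipped
-- ===== SOURCE B (Python) =====
-- def unclipped_length(cigar_tuple):
--     total = sum(v for _, v in cigar_tuple)
--     clipped = sum(v for k, v in cigar_tuple if k in (4, 5))
--     return total, total - clipped
-- ===== Notes on version B (the rewrite author's own statement) =====
-- stated objective: simpler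
-- what changed: Replaces the single interleaved two-accumulator loop with two summing passes: total of all lengths, and the clipped complement, returning (total, total - clipped).
import Mathlib
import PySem

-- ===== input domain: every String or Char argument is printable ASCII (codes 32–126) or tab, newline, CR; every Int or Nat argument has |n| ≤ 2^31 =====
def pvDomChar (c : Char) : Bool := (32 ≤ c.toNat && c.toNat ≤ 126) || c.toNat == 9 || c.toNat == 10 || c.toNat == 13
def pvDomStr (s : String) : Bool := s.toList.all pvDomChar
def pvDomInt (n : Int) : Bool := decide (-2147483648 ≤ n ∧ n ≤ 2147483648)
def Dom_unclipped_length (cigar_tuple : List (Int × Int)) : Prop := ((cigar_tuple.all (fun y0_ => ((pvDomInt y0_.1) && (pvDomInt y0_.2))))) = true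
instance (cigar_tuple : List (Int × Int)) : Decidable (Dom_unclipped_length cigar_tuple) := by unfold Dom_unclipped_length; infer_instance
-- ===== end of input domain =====

-- B replaces A's single two-accumulator loop by two summing passes (total, and clipped complement subtracted); simpler decomposition, same O(n) cost.

-- ===== PORT A =====
-- one fold carrying both accumulators, branch order as in A
def unclipped_length (cigar_tuple : List (Int × Int)) : Int × Int :=
  let st := cigar_tuple.foldl
    (fun (acc : Int × Int) kv =>
      let unclipped := acc.1
      let total := acc.2 + kv.2
      if kv.1 = 4 ∨ kv.1 = 5 then (unclipped, total)
      else (unclipped + kv.2, total))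
    (0, 0)
  (st.2, st.1)

-- ===== PORT B =====
def unclipped_length_alt (cigar_tuple : List (Int × Int)) : Int × Int :=
  let total := (cigar_tuple.map (fun kv => kv.2)).sum
  let clipped := ((cigar_tuple.filter (fun kv => kv.1 = 4 ∨ kv.1 = 5)).map (fun kv => kv.2)).sum
  (total, total - clipped)

-- ===== PRECONDITION & SPEC =====
def Spec_unclipped_length (cigar_tuple : List (Int × Int)) (out : Int × Int) : Prop := out = unclipped_length_alt cigar_tuple
instance (cigar_tuple : List (Int × Int)) (out : Int × Int) : Decidable (Spec_unclipped_length cigar_tuple out) := by unfold Spec_unclipped_length; infer_instance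

-- ===== CLAIM (what is proved, stated in full; the proofs are below) =====
def Claim_equal_unclipped_length : Prop := ∀ (cigar_tuple : List (Int × Int)), Dom_unclipped_length cigar_tuple → Spec_unclipped_length cigar_tuple (unclipped_length cigar_tuple)

-- ===== LEMMAS AND PROOFS =====

-- loop invariant: the fold from any start adds (unclipped sum, total sum) of the rest
theorem unclipped_foldl (l : List (Int × Int)) (u t : Int) :
    l.foldl
      (fun (acc : Int × Int) kv =>
        let unclipped := acc.1
        let total := acc.2 + kv.2
        if kv.1 = 4 ∨ kv.1 = 5 then (unclipped, total)
        else (unclipped + kv.2, total))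
      (u, t)
    = (u + ((l.map (fun kv => kv.2)).sum - ((l.filter (fun kv => kv.1 = 4 ∨ kv.1 = 5)).map (fun kv => kv.2)).sum),
       t + (l.map (fun kv => kv.2)).sum) := by
  induction l generalizing u t with
  | nil => simp
  | cons hd tl ih =>
    simp only [List.foldl_cons, List.map_cons, List.sum_cons, List.filter_cons]
    by_cases h : hd.1 = 4 ∨ hd.1 = 5
    · simp [h, ih]; ring
    · simp [h, ih]; constructor <;> ring

-- ===== VERDICT (by name: the statement is the Claim_ definition above) =====
theorem unclipped_length_spec : Claim_equal_unclipped_length := by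
  intro l _
  unfold Spec_unclipped_length unclipped_length unclipped_length_alt
  simp [unclipped_foldl]
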